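-- pv_equiv track=rewrite | github.com/Vishal-251044/Paarsh-Matrimony | backend/app/controllers/chatbot_controller.py | _format_partner_answer
-- ===== SOURCE A (Python) =====
-- from typing import Dict, Optional, List
--
-- def _format_partner_answer(profile: Dict) -> str:
--     """Format partner preferences as answer showing only filled fields"""
--     partner = profile.get("partnerInfo", {})
--
--     response_parts = ["**YOUR PARTNER PREFERENCES**"]
--     response_parts.append("")
--
--     # Basic Preferences
--     basic_prefs = []
--     if partner.get("preferredAgeRange"):
--         basic_prefs.append(f"Age Range: {partner['preferredAgeRange']}")
--     if partner.get("preferredHeight"):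
--         basic_prefs.append(f"Height: {partner['preferredHeight']}")
--     if partner.get("preferredMaritalStatus"):
--         basic_prefs.append(f"Marital Status: {partner['preferredMaritalStatus']}")
--     if partner.get("lookingFor"):
--         basic_prefs.append(f"Looking For: {partner['lookingFor']}")
--
--     if basic_prefs:
--         response_parts.append("**Basic Preferences:**")
--         for pref in basic_prefs:
--             response_parts.append(f"• {pref}")
--         response_parts.append("")
--
--     # Religious & Cultural
--     religious_prefs = []
--     if partner.get("preferredReligion"):
--         religious_prefs.append(f"Religion: {partner['preferredReligion']}")
--     if partner.get("preferredCaste"):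
--         religious_prefs.append(f"Caste: {partner['preferredCaste']}")
--     if partner.get("preferredMotherTongue"):
--         religious_prefs.append(f"Mother Tongue: {partner['preferredMotherTongue']}")
--
--     if religious_prefs:
--         response_parts.append("**Religious & Cultural:**")
--         for pref in religious_prefs:
--             response_parts.append(f"• {pref}")
--         response_parts.append("")
--
--     # Professional
--     professional_prefs = []
--     if partner.get("preferredEducation"):
--         professional_prefs.append(f"Education: {partner['preferredEducation']}")
--     if partner.get("preferredProfession"):
--         professional_prefs.append(f"Profession: {partner['preferredProfession']}")
--     if partner.get("preferredIncome"):
--         professional_prefs.append(f"Income: {partner['preferredIncome']}")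
--
--     if professional_prefs:
--         response_parts.append("**Professional:**")
--         for pref in professional_prefs:
--             response_parts.append(f"• {pref}")
--         response_parts.append("")
--
--     # Location
--     location_prefs = []
--     if partner.get("preferredLocation"):
--         location_prefs.append(f"Preferred Location: {partner['preferredLocation']}")
--     if partner.get("settledIn"):
--         location_prefs.append(f"Settled In: {partner['settledIn']}")
--
--     if location_prefs:
--         response_parts.append("**Location:**")
--         for pref in location_prefs:
--             response_parts.append(f"• {pref}")
--         response_parts.append("")
--
--     # Edit link
--     response_parts.append("**Update Preferences:**")
--     response_parts.append("• Edit → Profile → Partner Preferences")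
--     response_parts.append("")
--
--     return "\n".join(response_parts)
-- ===== SOURCE B (Python) =====
-- # Single-pass token-stream emitter: a flat FLOW of Header/Field/End tokens is
-- # replayed once, appending lines directly to the output string; the section
-- # header is emitted lazily ("pending") only when its first filled field fires,
-- # and End emits the blank line iff the header was consumed.
-- FLOW = [
--     ("H", "**Basic Preferences:**"),
--     ("F", "preferredAgeRange", "Age Range"),
--     ("F", "preferredHeight", "Height"),
--     ("F", "preferredMaritalStatus", "Marital Status"),
--     ("F", "lookingFor", "Looking For"),
--     ("E",),
--     ("H", "**Religious & Cultural:**"),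
--     ("F", "preferredReligion", "Religion"),
--     ("F", "preferredCaste", "Caste"),
--     ("F", "preferredMotherTongue", "Mother Tongue"),
--     ("E",),
--     ("H", "**Professional:**"),
--     ("F", "preferredEducation", "Education"),
--     ("F", "preferredProfession", "Profession"),
--     ("F", "preferredIncome", "Income"),
--     ("E",),
--     ("H", "**Location:**"),
--     ("F", "preferredLocation", "Preferred Location"),
--     ("F", "settledIn", "Settled In"),
--     ("E",),
-- ]
--
--
-- def _format_partner_answer(profile):
--     partner = profile.get("partnerInfo", {})
--     out = "**YOUR PARTNER PREFERENCES**\n\n"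
--     pending = None
--     for tok in FLOW:
--         if tok[0] == "H":
--             pending = tok[1]
--         elif tok[0] == "F":
--             v = partner.get(tok[1])
--             if v:
--                 if pending is not None:
--                     out += pending + "\n"
--                     pending = None
--                 out += f"• {tok[2]}: {v}\n"
--         else:  # "E": close section; blank line iff the header was emitted
--             if pending is None:
--                 out += "\n"
--     return out + "**Update Preferences:**\n• Edit → Profile → Partner Preferences\n"
-- ===== Notes on version B (the rewrite author's own statement) =====
-- stated objective: alternative
-- what changed: A collects per-section pref lists, builds a parts list and joins at the end; B replays one flat stream of Header/Field/End tokens in a single pass, appending each line directly to the output string, emitting a section header lazily only when its first filled field fires and the blank line when a non-empty section closes.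
import Mathlib
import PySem

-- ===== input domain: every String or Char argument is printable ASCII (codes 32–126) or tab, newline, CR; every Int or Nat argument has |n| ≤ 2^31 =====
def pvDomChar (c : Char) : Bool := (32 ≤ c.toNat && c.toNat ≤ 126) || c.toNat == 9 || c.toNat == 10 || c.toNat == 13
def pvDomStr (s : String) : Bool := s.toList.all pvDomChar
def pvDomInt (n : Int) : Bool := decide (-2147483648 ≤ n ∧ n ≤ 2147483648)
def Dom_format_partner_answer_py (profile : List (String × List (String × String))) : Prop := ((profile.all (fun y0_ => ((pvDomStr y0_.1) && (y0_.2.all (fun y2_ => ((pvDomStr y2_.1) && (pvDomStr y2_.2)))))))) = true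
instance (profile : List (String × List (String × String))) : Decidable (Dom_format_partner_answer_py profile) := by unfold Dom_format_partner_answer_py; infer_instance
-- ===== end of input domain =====

-- B replaces A's staged collect-then-join (per-section pref lists, parts list, final join)
-- by a single-pass token-stream emitter appending lines directly to the output string,
-- with lazily emitted section headers (objective: alternative decomposition, same cost).

-- ===== PORT A =====
-- A's per-field 'if partner.get(k): prefs.append(f"{label}: {partner[k]}")' blocks;
-- Python truthiness of the string partner.get(k, absent→falsy) is 'getD k "" ≠ ""'.
def format_partner_answer_py (profile : List (String × List (String × String))) : String :=
  let partner := PySem.Dict.mk ((PySem.Dict.mk profile).getD "partnerInfo" [])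
  let basic_prefs : List String :=
    (if partner.getD "preferredAgeRange" "" ≠ "" then ["Age Range: " ++ partner.getD "preferredAgeRange" ""] else []) ++
    (if partner.getD "preferredHeight" "" ≠ "" then ["Height: " ++ partner.getD "preferredHeight" ""] else []) ++
    (if partner.getD "preferredMaritalStatus" "" ≠ "" then ["Marital Status: " ++ partner.getD "preferredMaritalStatus" ""] else []) ++
    (if partner.getD "lookingFor" "" ≠ "" then ["Looking For: " ++ partner.getD "lookingFor" ""] else [])
  let religious_prefs : List String :=
    (if partner.getD "preferredReligion" "" ≠ "" then ["Religion: " ++ partner.getD "preferredReligion" ""] else []) ++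
    (if partner.getD "preferredCaste" "" ≠ "" then ["Caste: " ++ partner.getD "preferredCaste" ""] else []) ++
    (if partner.getD "preferredMotherTongue" "" ≠ "" then ["Mother Tongue: " ++ partner.getD "preferredMotherTongue" ""] else [])
  let professional_prefs : List String :=
    (if partner.getD "preferredEducation" "" ≠ "" then ["Education: " ++ partner.getD "preferredEducation" ""] else []) ++
    (if partner.getD "preferredProfession" "" ≠ "" then ["Profession: " ++ partner.getD "preferredProfession" ""] else []) ++
    (if partner.getD "preferredIncome" "" ≠ "" then ["Income: " ++ partner.getD "preferredIncome" ""] else [])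
  let location_prefs : List String :=
    (if partner.getD "preferredLocation" "" ≠ "" then ["Preferred Location: " ++ partner.getD "preferredLocation" ""] else []) ++
    (if partner.getD "settledIn" "" ≠ "" then ["Settled In: " ++ partner.getD "settledIn" ""] else [])
  let response_parts : List String :=
    ["**YOUR PARTNER PREFERENCES**", ""] ++
    (if basic_prefs ≠ [] then "**Basic Preferences:**" :: (basic_prefs.map (fun p => "• " ++ p) ++ [""]) else []) ++
    (if religious_prefs ≠ [] then "**Religious & Cultural:**" :: (religious_prefs.map (fun p => "• " ++ p) ++ [""]) else []) ++
    (if professional_prefs ≠ [] then "**Professional:**" :: (professional_prefs.map (fun p => "• " ++ p) ++ [""]) else []) ++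
    (if location_prefs ≠ [] then "**Location:**" :: (location_prefs.map (fun p => "• " ++ p) ++ [""]) else []) ++
    ["**Update Preferences:**", "• Edit → Profile → Partner Preferences", ""]
  PySem.Str.join "\n" response_parts

-- ===== PORT B =====
-- Source B's FLOW token stream: H header / F key label / E end-of-section
inductive PvTok : Type
  | H : String → PvTok
  | F : String → String → PvTok
  | E : PvTok
deriving DecidableEq, Repr

def pvFLOW : List PvTok :=
  [PvTok.H "**Basic Preferences:**",
   PvTok.F "preferredAgeRange" "Age Range",
   PvTok.F "preferredHeight" "Height",
   PvTok.F "preferredMaritalStatus" "Marital Status",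
   PvTok.F "lookingFor" "Looking For",
   PvTok.E,
   PvTok.H "**Religious & Cultural:**",
   PvTok.F "preferredReligion" "Religion",
   PvTok.F "preferredCaste" "Caste",
   PvTok.F "preferredMotherTongue" "Mother Tongue",
   PvTok.E,
   PvTok.H "**Professional:**",
   PvTok.F "preferredEducation" "Education",
   PvTok.F "preferredProfession" "Profession",
   PvTok.F "preferredIncome" "Income",
   PvTok.E,
   PvTok.H "**Location:**",
   PvTok.F "preferredLocation" "Preferred Location",
   PvTok.F "settledIn" "Settled In",
   PvTok.E]

-- Source B's loop body: state = (out, pending header)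
def pvStep (partner : PySem.Dict String String) (s : String × Option String) (t : PvTok) : String × Option String :=
  match t with
  | PvTok.H h => (s.1, some h)
  | PvTok.F k l =>
      let v := partner.getD k ""
      if v ≠ "" then
        match s.2 with
        | some h => ((s.1 ++ (h ++ "\n")) ++ ("• " ++ l ++ ": " ++ v ++ "\n"), none)
        | none => (s.1 ++ ("• " ++ l ++ ": " ++ v ++ "\n"), none)
      else s
  | PvTok.E =>
      match s.2 with
      | none => (s.1 ++ "\n", s.2)
      | some _ => s

def format_partner_answer_py_alt (profile : List (String × List (String × String))) : String :=
  let partner := PySem.Dict.mk ((PySem.Dict.mk profile).getD "partnerInfo" [])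
  let res := pvFLOW.foldl (pvStep partner) ("**YOUR PARTNER PREFERENCES**\n\n", none)
  res.1 ++ "**Update Preferences:**\n• Edit → Profile → Partner Preferences\n"

-- ===== PRECONDITION & SPEC =====
def Spec_format_partner_answer_py (profile : List (String × List (String × String))) (out : String) : Prop := out = format_partner_answer_py_alt profile
instance (profile : List (String × List (String × String))) (out : String) : Decidable (Spec_format_partner_answer_py profile out) := by unfold Spec_format_partner_answer_py; infer_instance

-- ===== CLAIM (what is proved, stated in full; the proofs are below) =====
def Claim_equal_format_partner_answer_py : Prop := ∀ (profile : List (String × List (String × String))), Dom_format_partner_answer_py profile → Spec_format_partner_answer_py profile (format_partner_answer_py profile)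

-- ===== LEMMAS AND PROOFS =====

-- proof-side helpers
def pvCat : List String → String
  | [] => ""
  | l :: ls => l ++ "\n" ++ pvCat ls

def pvPrefs (p : PySem.Dict String String) : List (String × String) → List String
  | [] => []
  | kl :: fs =>
      if p.getD kl.1 "" ≠ "" then (kl.2 ++ ": " ++ p.getD kl.1 "") :: pvPrefs p fs
      else pvPrefs p fs

def pvSecList (p : PySem.Dict String String) (h : String) (fs : List (String × String)) : List String :=
  if pvPrefs p fs ≠ [] then h :: ((pvPrefs p fs).map (fun b => "• " ++ b) ++ [""]) else []

def pvSecToks (h : String) (fs : List (String × String)) : List PvTok :=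
  PvTok.H h :: (fs.map (fun kl => PvTok.F kl.1 kl.2) ++ [PvTok.E])

theorem pv_if_singleton_append {c : Prop} [Decidable c] (a : String) (xs : List String) :
    (if c then [a] else []) ++ xs = if c then a :: xs else xs := by
  split <;> simp

theorem pvCat_append (X Y : List String) : pvCat (X ++ Y) = pvCat X ++ pvCat Y := by
  induction X with
  | nil => simp [pvCat]
  | cons a X ih => simp [pvCat, ih, String.append_assoc]

theorem pv_join_cons (a : String) (M : List String) (h : M ≠ []) :
    PySem.Str.join "\n" (a :: M) = a ++ "\n" ++ PySem.Str.join "\n" M := by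
  cases M with
  | nil => exact absurd rfl h
  | cons m ms =>
      apply String.toList_injective
      simp [PySem.Str.join, PySem.Chars.join, List.intercalate,
        String.append_assoc]

theorem pv_joinNl (L : List String) : PySem.Str.join "\n" (L ++ [""]) = pvCat L := by
  induction L with
  | nil => decide
  | cons a L ih =>
      rw [List.cons_append, pv_join_cons a (L ++ [""]) (by simp), ih, pvCat]

theorem pv_fold_none (p : PySem.Dict String String) (fs : List (String × String)) :
    ∀ out : String,
      List.foldl (pvStep p) (out, none) (fs.map (fun kl => PvTok.F kl.1 kl.2)) =
        (out ++ pvCat ((pvPrefs p fs).map (fun b => "• " ++ b)), none) := by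
  induction fs with
  | nil => intro out; simp [pvPrefs, pvCat]
  | cons kl fs ih =>
      intro out
      by_cases hv : p.getD kl.1 "" = ""
      · simp [pvStep, hv, ih, pvPrefs]
      · simp [pvStep, hv, ih, pvPrefs, pvCat, String.append_assoc]

theorem pv_fold_some (p : PySem.Dict String String) (fs : List (String × String)) :
    ∀ (out h : String),
      List.foldl (pvStep p) (out, some h) (fs.map (fun kl => PvTok.F kl.1 kl.2)) =
        if pvPrefs p fs = [] then (out, some h)
        else (out ++ (h ++ "\n" ++ pvCat ((pvPrefs p fs).map (fun b => "• " ++ b))), none) := by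
  induction fs with
  | nil => intro out h; simp [pvPrefs]
  | cons kl fs ih =>
      intro out h
      by_cases hv : p.getD kl.1 "" = ""
      · simp [pvStep, hv, ih, pvPrefs]
      · simp [pvStep, hv, pvPrefs, pvCat, pv_fold_none, String.append_assoc]

theorem pv_fold_sec (p : PySem.Dict String String) (out : String) (pend : Option String)
    (h : String) (fs : List (String × String)) :
    List.foldl (pvStep p) (out, pend) (pvSecToks h fs) =
      (out ++ pvCat (pvSecList p h fs),
       if pvPrefs p fs = [] then some h else none) := by
  rw [pvSecToks, List.foldl_cons, List.foldl_append,
    show pvStep p (out, pend) (PvTok.H h) = (out, some h) from rfl, pv_fold_some]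
  by_cases hp : pvPrefs p fs = [] <;>
    simp [hp, pvSecList, pvCat, pvCat_append, pvStep, String.append_assoc]

theorem pvFLOW_eq : pvFLOW =
    pvSecToks "**Basic Preferences:**"
      [("preferredAgeRange", "Age Range"), ("preferredHeight", "Height"),
       ("preferredMaritalStatus", "Marital Status"), ("lookingFor", "Looking For")] ++
    (pvSecToks "**Religious & Cultural:**"
      [("preferredReligion", "Religion"), ("preferredCaste", "Caste"),
       ("preferredMotherTongue", "Mother Tongue")] ++
    (pvSecToks "**Professional:**"
      [("preferredEducation", "Education"), ("preferredProfession", "Profession"),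
       ("preferredIncome", "Income")] ++
    pvSecToks "**Location:**"
      [("preferredLocation", "Preferred Location"), ("settledIn", "Settled In")])) := rfl

theorem pv_block2 (p : PySem.Dict String String) (h k1 a1 l1 k2 a2 l2 : String)
    (h1 : a1 = l1 ++ ": ") (h2 : a2 = l2 ++ ": ") :
    (if ((if p.getD k1 "" ≠ "" then [a1 ++ p.getD k1 ""] else []) ++
         (if p.getD k2 "" ≠ "" then [a2 ++ p.getD k2 ""] else [])) ≠ []
       then h :: ((((if p.getD k1 "" ≠ "" then [a1 ++ p.getD k1 ""] else []) ++
         (if p.getD k2 "" ≠ "" then [a2 ++ p.getD k2 ""] else [])).map (fun pr => "• " ++ pr)) ++ [""])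
       else [])
      = pvSecList p h [(k1, l1), (k2, l2)] := by
  subst h1 h2
  simp only [pvSecList, pvPrefs, pv_if_singleton_append, String.append_assoc]

theorem pv_block3 (p : PySem.Dict String String) (h k1 a1 l1 k2 a2 l2 k3 a3 l3 : String)
    (h1 : a1 = l1 ++ ": ") (h2 : a2 = l2 ++ ": ") (h3 : a3 = l3 ++ ": ") :
    (if ((if p.getD k1 "" ≠ "" then [a1 ++ p.getD k1 ""] else []) ++
         (if p.getD k2 "" ≠ "" then [a2 ++ p.getD k2 ""] else []) ++
         (if p.getD k3 "" ≠ "" then [a3 ++ p.getD k3 ""] else [])) ≠ []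
       then h :: ((((if p.getD k1 "" ≠ "" then [a1 ++ p.getD k1 ""] else []) ++
         (if p.getD k2 "" ≠ "" then [a2 ++ p.getD k2 ""] else []) ++
         (if p.getD k3 "" ≠ "" then [a3 ++ p.getD k3 ""] else [])).map (fun pr => "• " ++ pr)) ++ [""])
       else [])
      = pvSecList p h [(k1, l1), (k2, l2), (k3, l3)] := by
  subst h1 h2 h3
  simp only [pvSecList, pvPrefs, pv_if_singleton_append, String.append_assoc]
  split_ifs <;> simp_all

theorem pv_block4 (p : PySem.Dict String String) (h k1 a1 l1 k2 a2 l2 k3 a3 l3 k4 a4 l4 : String)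
    (h1 : a1 = l1 ++ ": ") (h2 : a2 = l2 ++ ": ") (h3 : a3 = l3 ++ ": ") (h4 : a4 = l4 ++ ": ") :
    (if ((if p.getD k1 "" ≠ "" then [a1 ++ p.getD k1 ""] else []) ++
         (if p.getD k2 "" ≠ "" then [a2 ++ p.getD k2 ""] else []) ++
         (if p.getD k3 "" ≠ "" then [a3 ++ p.getD k3 ""] else []) ++
         (if p.getD k4 "" ≠ "" then [a4 ++ p.getD k4 ""] else [])) ≠ []
       then h :: ((((if p.getD k1 "" ≠ "" then [a1 ++ p.getD k1 ""] else []) ++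
         (if p.getD k2 "" ≠ "" then [a2 ++ p.getD k2 ""] else []) ++
         (if p.getD k3 "" ≠ "" then [a3 ++ p.getD k3 ""] else []) ++
         (if p.getD k4 "" ≠ "" then [a4 ++ p.getD k4 ""] else [])).map (fun pr => "• " ++ pr)) ++ [""])
       else [])
      = pvSecList p h [(k1, l1), (k2, l2), (k3, l3), (k4, l4)] := by
  subst h1 h2 h3 h4
  simp only [pvSecList, pvPrefs, pv_if_singleton_append, String.append_assoc]
  split_ifs <;> simp_all

-- ===== VERDICT (by name: the statement is the Claim_ definition above) =====
theorem format_partner_answer_py_spec : Claim_equal_format_partner_answer_py := by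
  intro profile _
  unfold Spec_format_partner_answer_py
  simp only [format_partner_answer_py, format_partner_answer_py_alt]
  set p := PySem.Dict.mk ((PySem.Dict.mk profile).getD "partnerInfo" []) with hp
  rw [pvFLOW_eq, List.foldl_append, List.foldl_append, List.foldl_append,
    pv_fold_sec, pv_fold_sec, pv_fold_sec, pv_fold_sec]
  rw [pv_block4 p "**Basic Preferences:**"
        "preferredAgeRange" "Age Range: " "Age Range"
        "preferredHeight" "Height: " "Height"
        "preferredMaritalStatus" "Marital Status: " "Marital Status"
        "lookingFor" "Looking For: " "Looking For" rfl rfl rfl rfl,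
      pv_block3 p "**Religious & Cultural:**"
        "preferredReligion" "Religion: " "Religion"
        "preferredCaste" "Caste: " "Caste"
        "preferredMotherTongue" "Mother Tongue: " "Mother Tongue" rfl rfl rfl,
      pv_block3 p "**Professional:**"
        "preferredEducation" "Education: " "Education"
        "preferredProfession" "Profession: " "Profession"
        "preferredIncome" "Income: " "Income" rfl rfl rfl,
      pv_block2 p "**Location:**"
        "preferredLocation" "Preferred Location: " "Preferred Location"
        "settledIn" "Settled In: " "Settled In" rfl rfl]
  have hsplit : ∀ X1 X2 X3 X4 : List String,
      ((((["**YOUR PARTNER PREFERENCES**", ""] ++ X1) ++ X2) ++ X3) ++ X4) ++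
          ["**Update Preferences:**", "• Edit → Profile → Partner Preferences", ""] =
        (((((["**YOUR PARTNER PREFERENCES**", ""] ++ X1) ++ X2) ++ X3) ++ X4) ++
          ["**Update Preferences:**", "• Edit → Profile → Partner Preferences"]) ++ [""] := by
    intro X1 X2 X3 X4; simp
  rw [hsplit, pv_joinNl]
  have hT : pvCat ["**YOUR PARTNER PREFERENCES**", ""] = "**YOUR PARTNER PREFERENCES**\n\n" := rfl
  have hU : pvCat ["**Update Preferences:**", "• Edit → Profile → Partner Preferences"] =
      "**Update Preferences:**\n• Edit → Profile → Partner Preferences\n" := rfl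
  simp only [pvCat_append, hT, hU, String.append_assoc]
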